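-- pv_equiv track=rewrite | github.com/LiaLopez1/Scrabble_bot | prueba.py | es_solucionable
-- ===== SOURCE A (Python) =====
-- def es_solucionable(tablero):
--     inversiones = 0
--     tablero_lineal = [x for x in tablero if x != 0]
--     for i in range(len(tablero_lineal)):
--         for j in range(i + 1, len(tablero_lineal)):
--             if tablero_lineal[i] > tablero_lineal[j]:
--                 inversiones += 1
--     return inversiones % 2 == 0
-- ===== SOURCE B (Python) =====
-- def es_solucionable(tablero):
--     a = [x for x in tablero if x != 0]
--
--     def merge_count(L, R):
--         # merge two sorted runs, counting cross inversions
--         out = []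
--         i = j = 0
--         c = 0
--         while i < len(L) and j < len(R):
--             if L[i] <= R[j]:
--                 out.append(L[i])
--                 i += 1
--             else:
--                 c += len(L) - i
--                 out.append(R[j])
--                 j += 1
--         out.extend(L[i:])
--         out.extend(R[j:])
--         return out, c
--
--     def sort_count(l):
--         if len(l) < 2:
--             return l, 0
--         m = len(l) // 2
--         L, cl = sort_count(l[:m])
--         R, cr = sort_count(l[m:])
--         merged, cx = merge_count(L, R)
--         return merged, cl + cr + cx
--
--     _, inv = sort_count(a)
--     return inv % 2 == 0
-- ===== Notes on version B (the rewrite author's own statement) =====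
-- stated objective: faster
-- what changed: Replaces the O(n^2) nested index loops over all pairs by a merge-sort that counts inversions while merging, then tests the parity of the count.
import Mathlib
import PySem

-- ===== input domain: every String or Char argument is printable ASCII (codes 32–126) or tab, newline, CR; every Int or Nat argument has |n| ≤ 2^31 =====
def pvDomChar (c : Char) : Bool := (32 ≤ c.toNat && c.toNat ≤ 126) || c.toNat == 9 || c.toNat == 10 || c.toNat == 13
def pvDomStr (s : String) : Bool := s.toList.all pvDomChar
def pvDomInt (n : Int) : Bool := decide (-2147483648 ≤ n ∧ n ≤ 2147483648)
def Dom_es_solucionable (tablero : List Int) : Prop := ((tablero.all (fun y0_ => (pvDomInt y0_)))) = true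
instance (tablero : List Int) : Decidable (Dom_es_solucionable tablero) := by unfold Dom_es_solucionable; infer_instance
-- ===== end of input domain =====

-- B replaces A's O(n^2) nested pair loops by a merge sort that counts inversions while merging (measurably faster on large inputs).


-- ===== PORT A =====
-- literal transliteration of A: filter out zeros, nested index loops over range,
-- count pairs i < j with lin[i] > lin[j], test parity.
def es_solucionable (tablero : List Int) : Bool :=
  let lin := tablero.filter (fun x => x != 0)
  let inversiones : Int :=
    (PySem.List.pyRange 0 lin.length 1).foldl (fun acc i =>
      (PySem.List.pyRange (i + 1) lin.length 1).foldl (fun acc2 j =>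
        if PySem.List.pyGetD lin i 0 > PySem.List.pyGetD lin j 0 then acc2 + 1 else acc2) acc) 0
  PySem.Int.mod inversiones 2 == 0

-- ===== PORT B =====
-- merge of two runs, counting cross inversions; the Python while loop over indices i, j
-- is this structural recursion on the two remaining suffixes (len(L) - i = length of the left suffix).
def pvMergeCnt : List Int → List Int → List Int × Int
  | [], r => (r, 0)
  | x :: xs, [] => (x :: xs, 0)
  | x :: xs, y :: ys =>
    if x ≤ y then
      let p := pvMergeCnt xs (y :: ys)
      (x :: p.1, p.2)
    else
      let p := pvMergeCnt (x :: xs) ys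
      (y :: p.1, p.2 + ((xs.length : Int) + 1))

-- sort_count; l[:m] / l[m:] with 0 ≤ m ≤ len(l) are List.take m / List.drop m (exact here)
def pvSortCnt (l : List Int) : List Int × Int :=
  if l.length < 2 then (l, 0)
  else
    let m := l.length / 2
    let p1 := pvSortCnt (l.take m)
    let p2 := pvSortCnt (l.drop m)
    let p3 := pvMergeCnt p1.1 p2.1
    (p3.1, p1.2 + p2.2 + p3.2)
termination_by l.length
decreasing_by
  · simp only [List.length_take]; omega
  · simp only [List.length_drop]; omega

def es_solucionable_alt (tablero : List Int) : Bool :=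
  let a := tablero.filter (fun x => x != 0)
  PySem.Int.mod (pvSortCnt a).2 2 == 0

-- ===== PRECONDITION & SPEC =====
def Spec_es_solucionable (tablero : List Int) (out : Bool) : Prop := out = es_solucionable_alt tablero
instance (tablero : List Int) (out : Bool) : Decidable (Spec_es_solucionable tablero out) := by unfold Spec_es_solucionable; infer_instance

-- ===== CLAIM (what is proved, stated in full; the proofs are below) =====
def Claim_equal_es_solucionable : Prop := ∀ (tablero : List Int), Dom_es_solucionable tablero → Spec_es_solucionable tablero (es_solucionable tablero)

-- ===== LEMMAS AND PROOFS =====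

-- the mathematical inversion count and the cross-inversion count between two blocks
def pvInv : List Int → Nat
  | [] => 0
  | x :: xs => xs.countP (fun y => decide (y < x)) + pvInv xs

def pvCross (l r : List Int) : Nat :=
  (l.map (fun a => r.countP (fun b => decide (b < a)))).sum

lemma pvCross_nil_right (l : List Int) : pvCross l [] = 0 := by
  simp [pvCross]

lemma pvCross_cons_right (l : List Int) (y : Int) (r : List Int) :
    pvCross l (y :: r) = l.countP (fun a => decide (y < a)) + pvCross l r := by
  induction l with
  | nil => simp [pvCross]
  | cons a l ih =>
    simp only [pvCross, List.map_cons, List.sum_cons] at ih ⊢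
    rw [List.countP_cons, List.countP_cons]
    by_cases h : y < a <;>
      simp only [h, decide_true, decide_false, if_true] <;> omega

lemma pvInv_append (l r : List Int) :
    pvInv (l ++ r) = pvInv l + pvInv r + pvCross l r := by
  induction l with
  | nil => simp [pvInv, pvCross]
  | cons x l ih =>
    simp only [List.cons_append, pvInv, ih, List.countP_append, pvCross, List.map_cons,
      List.sum_cons]
    omega

lemma pvCross_perm_left {l l' : List Int} (h : l.Perm l') (r : List Int) :
    pvCross l r = pvCross l' r := by
  exact List.Perm.sum_eq (h.map _)

lemma pvCross_perm_right (l : List Int) {r r' : List Int} (h : r.Perm r') :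
    pvCross l r = pvCross l r' := by
  unfold pvCross
  congr 1
  exact List.map_congr_left (fun a _ => h.countP_eq _)

lemma pvMergeCnt_perm (l r : List Int) : (pvMergeCnt l r).1.Perm (l ++ r) := by
  fun_induction pvMergeCnt with
  | case1 r => simp
  | case2 x xs => simp
  | case3 x xs y ys h p ih =>
    simpa using ih.cons x
  | case4 x xs y ys h p ih =>
    refine List.Perm.trans (ih.cons y) ?_
    exact (List.perm_middle.symm)

lemma pvMergeCnt_sorted {l r : List Int} (hl : l.Pairwise (· ≤ ·)) (hr : r.Pairwise (· ≤ ·)) :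
    (pvMergeCnt l r).1.Pairwise (· ≤ ·) := by
  fun_induction pvMergeCnt with
  | case1 r => exact hr
  | case2 x xs => exact hl
  | case3 x xs y ys h p ih =>
    refine List.Pairwise.cons ?_ (ih (List.Pairwise.of_cons hl) hr)
    intro b hb
    have hb' : b ∈ xs ++ (y :: ys) := (pvMergeCnt_perm xs (y :: ys)).mem_iff.mp hb
    rcases List.mem_append.mp hb' with h1 | h1
    · exact List.rel_of_pairwise_cons hl h1
    · rcases List.mem_cons.mp h1 with rfl | h2
      · exact h
      · exact le_trans h (List.rel_of_pairwise_cons hr h2)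
  | case4 x xs y ys h p ih =>
    have hyx : y ≤ x := le_of_lt (lt_of_not_ge h)
    refine List.Pairwise.cons ?_ (ih hl (List.Pairwise.of_cons hr))
    intro b hb
    have hb' : b ∈ (x :: xs) ++ ys := (pvMergeCnt_perm (x :: xs) ys).mem_iff.mp hb
    rcases List.mem_append.mp hb' with h1 | h1
    · rcases List.mem_cons.mp h1 with rfl | h2
      · exact hyx
      · exact le_trans hyx (List.rel_of_pairwise_cons hl h2)
    · exact List.rel_of_pairwise_cons hr h1

lemma pvMergeCnt_cnt {l r : List Int} (hl : l.Pairwise (· ≤ ·)) (hr : r.Pairwise (· ≤ ·)) :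
    (pvMergeCnt l r).2 = (pvCross l r : Int) := by
  fun_induction pvMergeCnt with
  | case1 r => simp [pvCross]
  | case2 x xs => simp [pvCross_nil_right]
  | case3 x xs y ys h p ih =>
    have hcnt : (y :: ys).countP (fun b => decide (b < x)) = 0 := by
      rw [List.countP_eq_zero]
      intro b hb
      rcases List.mem_cons.mp hb with rfl | h2
      · simpa using not_lt.mpr h
      · have : y ≤ b := List.rel_of_pairwise_cons hr h2
        simpa using not_lt.mpr (le_trans h this)
    rw [show pvCross (x :: xs) (y :: ys) = pvCross xs (y :: ys) by
      simp [pvCross, hcnt]]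
    exact ih (List.Pairwise.of_cons hl) hr
  | case4 x xs y ys h p ih =>
    have hx : y < x := lt_of_not_ge h
    have hall : xs.countP (fun a => decide (y < a)) = xs.length :=
      List.countP_eq_length.mpr (fun a ha => by
        have : x ≤ a := List.rel_of_pairwise_cons hl ha
        simpa using lt_of_lt_of_le hx this)
    have hcnt : (x :: xs).countP (fun a => decide (y < a)) = xs.length + 1 := by
      rw [List.countP_cons, hall]
      simp [hx]
    have := ih hl (List.Pairwise.of_cons hr)
    rw [pvCross_cons_right, hcnt, this]
    push_cast
    ring

lemma pvSortCnt_spec (l : List Int) :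
    (pvSortCnt l).1.Perm l ∧ (pvSortCnt l).1.Pairwise (· ≤ ·) ∧
      (pvSortCnt l).2 = (pvInv l : Int) := by
  fun_induction pvSortCnt with
  | case1 l h =>
    have hsmall : l = [] ∨ ∃ a, l = [a] := by
      match l with
      | [] => exact Or.inl rfl
      | [a] => exact Or.inr ⟨a, rfl⟩
      | a :: b :: t => simp at h
    rcases hsmall with rfl | ⟨a, rfl⟩ <;> simp [pvInv]
  | case2 l h m p1 p2 p3 ih1 ih2 =>
    obtain ⟨hp1, hs1, hc1⟩ := ih1
    obtain ⟨hp2, hs2, hc2⟩ := ih2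
    have hperm : p3.1.Perm l := by
      refine ((pvMergeCnt_perm p1.1 p2.1).trans ?_)
      refine (hp1.append hp2).trans ?_
      rw [List.take_append_drop]
    refine ⟨hperm, pvMergeCnt_sorted hs1 hs2, ?_⟩
    have hcnt : p3.2 = (pvCross (l.take m) (l.drop m) : Int) := by
      rw [pvMergeCnt_cnt hs1 hs2, pvCross_perm_left hp1, pvCross_perm_right _ hp2]
    have hinv : pvInv l = pvInv (l.take m) + pvInv (l.drop m) + pvCross (l.take m) (l.drop m) := by
      conv_lhs => rw [← List.take_append_drop m l]
      exact pvInv_append _ _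
    rw [hc1, hc2, hcnt, hinv]
    push_cast
    ring

-- the inner countP over a pyRange of indices is a countP over the drop-suffix
lemma pvCountP_pyRange (lin : List Int) (p : Int → Bool) :
    ∀ k a : Nat, lin.length - a = k →
      (PySem.List.pyRange (a : Int) lin.length 1).countP
          (fun j => p (PySem.List.pyGetD lin j 0)) = (lin.drop a).countP p := by
  intro k
  induction k with
  | zero =>
    intro a ha
    rw [PySem.List.pyRange_one_eq_nil (by omega)]
    rw [List.drop_eq_nil_of_le (by omega)]
    simp
  | succ k ih =>
    intro a ha
    have hlt : a < lin.length := by omega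
    rw [PySem.List.pyRange_one_cons (by exact_mod_cast hlt)]
    have h1 : ((a : Int) + 1) = ((a + 1 : Nat) : Int) := by push_cast; ring
    rw [List.countP_cons, h1, ih (a + 1) (by omega)]
    have hget : PySem.List.pyGetD lin (a : Int) 0 = lin[a] :=
      PySem.List.pyGetD_ofNat lin a 0 hlt
    rw [List.drop_eq_getElem_cons hlt, List.countP_cons, hget]

-- the whole double loop of A computes the inversion count
lemma pvAcount (lin : List Int) :
    ∀ (k a : Nat) (c : Int), lin.length - a = k →
      (PySem.List.pyRange (a : Int) lin.length 1).foldl (fun acc i =>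
        (PySem.List.pyRange (i + 1) lin.length 1).foldl (fun acc2 j =>
          if PySem.List.pyGetD lin i 0 > PySem.List.pyGetD lin j 0 then acc2 + 1 else acc2) acc)
        c = c + (pvInv (lin.drop a) : Int) := by
  intro k
  induction k with
  | zero =>
    intro a c ha
    rw [PySem.List.pyRange_one_eq_nil (by omega)]
    rw [List.drop_eq_nil_of_le (by omega)]
    simp [pvInv]
  | succ k ih =>
    intro a c ha
    have hlt : a < lin.length := by omega
    rw [PySem.List.pyRange_one_cons (by exact_mod_cast hlt)]
    rw [List.foldl_cons]
    rw [PySem.List.foldl_ite_add_one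
      (p := fun j => PySem.List.pyGetD lin (a : Int) 0 > PySem.List.pyGetD lin j 0)]
    have h1 : ((a : Int) + 1) = ((a + 1 : Nat) : Int) := by push_cast; ring
    rw [h1, ih (a + 1) _ (by omega)]
    have hget : PySem.List.pyGetD lin (a : Int) 0 = lin[a] :=
      PySem.List.pyGetD_ofNat lin a 0 hlt
    have hcnt := pvCountP_pyRange lin (fun y => decide (y < lin[a]))
      (lin.length - (a + 1)) (a + 1) rfl
    simp only [hget]
    rw [hcnt]
    rw [List.drop_eq_getElem_cons hlt]
    simp only [pvInv]
    push_cast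
    ring

-- ===== VERDICT (by name: the statement is the Claim_ definition above) =====
theorem es_solucionable_spec : Claim_equal_es_solucionable := by
  intro tablero _
  simp only [Spec_es_solucionable, es_solucionable, es_solucionable_alt]
  set lin := tablero.filter (fun x => x != 0) with hlin
  have hA := pvAcount lin lin.length 0 0 (by omega)
  simp only [Nat.cast_zero, List.drop_zero, zero_add] at hA
  rw [hA, (pvSortCnt_spec lin).2.2]
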